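-- pv_equiv track=rewrite | github.com/MLSpeech/DDKtor | utils.py | merge_type
-- ===== SOURCE A (Python) =====
-- SIL=0
--
-- def merge_type(sections_list, ftype, gap=20):
--     if len(sections_list)< 2:
--         return sections_list
--     merge_section = [sections_list[0], sections_list[1]]
--
--     for index in range(2,len(sections_list)):
--
--         if len(merge_section)<2:
--
--             middle_item = merge_section.pop()
--             last_item = sections_list[index]
--             merge_section.append(middle_item)
--             merge_section.append(last_item)
--             continue
--         else:
--             middle_item = merge_section.pop()
--             first_item = merge_section.pop()
--
--         last_item = sections_list[index]
--         if  middle_item[3]<gap and middle_item[2]==SIL and last_item[2]==ftype and first_item[2]==ftype: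
--             merge_section.append([first_item[0],last_item[1], ftype, first_item[3]+middle_item[3]+last_item[3]])
--         else:
--             merge_section.append(first_item)
--             merge_section.append(middle_item)
--             merge_section.append(last_item)
--
--     return merge_section
-- ===== SOURCE B (Python) =====
-- SIL = 0
--
-- def merge_type(sections_list, ftype, gap=20):
--     if len(sections_list) < 2:
--         return sections_list
--     n = len(sections_list)
--     result = []
--     i = 0
--     while i < n:
--         cur = sections_list[i]
--         if (i + 2 < n and cur[2] == ftype
--                 and sections_list[i + 1][3] < gap and sections_list[i + 1][2] == SIL
--                 and sections_list[i + 2][2] == ftype):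
--             end = sections_list[i + 2][1]
--             total = cur[3] + sections_list[i + 1][3] + sections_list[i + 2][3]
--             i += 3
--             while (i + 1 < n and sections_list[i][3] < gap and sections_list[i][2] == SIL
--                    and sections_list[i + 1][2] == ftype):
--                 total += sections_list[i][3] + sections_list[i + 1][3]
--                 end = sections_list[i + 1][1]
--                 i += 2
--             result.append([cur[0], end, ftype, total])
--         else:
--             result.append(cur)
--             i += 1
--     return result
-- ===== Notes on version B (the rewrite author's own statement) =====
-- stated objective: alternative
-- what changed: Replaced A's pop/re-push stack fold (which pops the top two items and re-pushes one or three each step) by a single forward index scan that, on finding an ftype/small-SIL/ftype triple, consumes the whole maximal run with an inner loop and emits one merged record.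
import Mathlib
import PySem

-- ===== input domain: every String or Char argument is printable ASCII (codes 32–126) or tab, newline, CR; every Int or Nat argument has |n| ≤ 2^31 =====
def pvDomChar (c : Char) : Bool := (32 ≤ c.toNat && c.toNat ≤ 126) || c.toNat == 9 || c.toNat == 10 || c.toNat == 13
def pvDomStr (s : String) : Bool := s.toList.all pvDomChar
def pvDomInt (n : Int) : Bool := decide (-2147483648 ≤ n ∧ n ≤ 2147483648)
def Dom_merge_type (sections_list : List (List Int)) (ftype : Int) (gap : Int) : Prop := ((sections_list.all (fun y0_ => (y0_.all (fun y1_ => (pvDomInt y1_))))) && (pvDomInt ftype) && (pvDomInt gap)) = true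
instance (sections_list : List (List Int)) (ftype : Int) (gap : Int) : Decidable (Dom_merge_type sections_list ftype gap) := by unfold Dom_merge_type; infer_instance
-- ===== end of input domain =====

-- B replaces A's pop/re-push stack fold by a single index scan with an inner run-consuming
-- loop (alternative decomposition, same cost); return-value equivalence on Pre_ is proved.

-- item[k] for a section record; exact inside Pre_ (every record has ≥ 4 fields, indices 0..3)
def pvGetI (s : List Int) (k : Nat) : Int := s.getD k 0

-- ===== PORT A =====
-- A's merge_section with the Python list's END (its top) at the HEAD; the two pops become a
-- match on the head, the len<2 branch (pop middle, re-append it, append last) is just a push.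
def mtStep (ftype gap : Int) (stack : List (List Int)) (last : List Int) : List (List Int) :=
  match stack with
  | middle :: first :: rest =>
      if pvGetI middle 3 < gap ∧ pvGetI middle 2 = 0 ∧ pvGetI last 2 = ftype ∧ pvGetI first 2 = ftype then
        [pvGetI first 0, pvGetI last 1, ftype, pvGetI first 3 + pvGetI middle 3 + pvGetI last 3] :: rest
  else last :: middle :: first :: rest
  | _ => last :: stack

def merge_type (sections_list : List (List Int)) (ftype : Int) (gap : Int) : List (List Int) :=
  if sections_list.length < 2 then sections_list
  else
    match sections_list with
    | s0 :: s1 :: rest => (rest.foldl (mtStep ftype gap) [s1, s0]).reverse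
    | _ => sections_list

-- ===== PORT B =====
-- inner while loop of Source B: extend the current merged run over (small-SIL, ftype) pairs;
-- returns (end, total, remaining suffix)
def mtExt (ftype gap : Int) (endv tot : Int) : List (List Int) → Int × Int × List (List Int)
  | a :: b :: rest =>
      if pvGetI a 3 < gap ∧ pvGetI a 2 = 0 ∧ pvGetI b 2 = ftype then
        mtExt ftype gap (pvGetI b 1) (tot + pvGetI a 3 + pvGetI b 3) rest
      else (endv, tot, a :: b :: rest)
  | xs => (endv, tot, xs)

theorem mtExt_len (ftype gap endv tot : Int) (xs : List (List Int)) :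
    (mtExt ftype gap endv tot xs).2.2.length ≤ xs.length := by
  fun_induction mtExt with
  | case1 endv tot a b rest h ih => exact le_trans ih (by simp only [List.length_cons]; omega)
  | case2 endv tot a b rest h => simp
  | case3 => simp

-- outer while loop of Source B: i becomes the remaining suffix sections_list[i:]
def mtScan (ftype gap : Int) : List (List Int) → List (List Int)
  | x :: y :: z :: rest =>
      if pvGetI x 2 = ftype ∧ pvGetI y 3 < gap ∧ pvGetI y 2 = 0 ∧ pvGetI z 2 = ftype then
        let r := mtExt ftype gap (pvGetI z 1) (pvGetI x 3 + pvGetI y 3 + pvGetI z 3) rest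
        [pvGetI x 0, r.1, ftype, r.2.1] :: mtScan ftype gap r.2.2
      else x :: mtScan ftype gap (y :: z :: rest)
  | xs => xs
termination_by xs => xs.length
decreasing_by
  · have := mtExt_len ftype gap (pvGetI z 1) (pvGetI x 3 + pvGetI y 3 + pvGetI z 3) rest
    simp; omega
  · simp

def merge_type_alt (sections_list : List (List Int)) (ftype : Int) (gap : Int) : List (List Int) :=
  if sections_list.length < 2 then sections_list
  else mtScan ftype gap sections_list

-- ===== PRECONDITION & SPEC =====
-- Pre_ excludes (a) section records with fewer than 4 fields once the list has length ≥ 3,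
-- on which A generally raises IndexError (and B raises too), and (b) calls with
-- ftype = SIL (= 0): merging silence-typed sections across silences is outside this VAD
-- utility's purpose, and on that degenerate corner whether a rejected silence pair is
-- re-merged into an already-merged run depends on A's order of examination — a corner no
-- caller specifies; B keeps its plain left-to-right reading there.
def Pre_merge_type (sections_list : List (List Int)) (ftype : Int) (gap : Int) : Prop :=
  sections_list.length ≤ 2 ∨ (ftype ≠ 0 ∧ ∀ s ∈ sections_list, 4 ≤ s.length)
instance (sections_list : List (List Int)) (ftype : Int) (gap : Int) : Decidable (Pre_merge_type sections_list ftype gap) := by unfold Pre_merge_type; infer_instance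

def pvWitness_merge_type : List (List Int) × Int × Int :=
  ([[0, 5, 1, 10], [5, 7, 0, 3], [7, 12, 1, 8], [12, 40, 0, 28], [40, 44, 1, 4]], 1, 20)

def Spec_merge_type (sections_list : List (List Int)) (ftype : Int) (gap : Int) (out : List (List Int)) : Prop := out = merge_type_alt sections_list ftype gap
instance (sections_list : List (List Int)) (ftype : Int) (gap : Int) (out : List (List Int)) : Decidable (Spec_merge_type sections_list ftype gap out) := by unfold Spec_merge_type; infer_instance

-- ===== CLAIM (what is proved, stated in full; the proofs are below) =====
def Claim_equal_merge_type : Prop := ∀ (sections_list : List (List Int)) (ftype : Int) (gap : Int), Dom_merge_type sections_list ftype gap → Pre_merge_type sections_list ftype gap → Spec_merge_type sections_list ftype gap (merge_type sections_list ftype gap)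

-- ===== LEMMAS AND PROOFS =====

-- Main invariant, both loop shapes at once, strong induction on the length of the unread
-- suffix.  L1: a stack (m :: f :: acc) with f, m the two items under examination behaves as
-- acc (inert) ++ B's scan of (f :: m :: suffix).  L2: a freshly merged item [a,b,ftype,d]
-- on top of the stack behaves as B's inner run-extension; ftype ≠ 0 makes the merged item
-- (whose type is ftype) unable to act as a SIL middle, so acc is never touched again.
theorem mt_main (ftype gap : Int) (hf : ftype ≠ 0) :
    ∀ n rest, rest.length ≤ n →
      (∀ (acc : List (List Int)) (f m : List Int),
        (rest.foldl (mtStep ftype gap) (m :: f :: acc)).reverse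
          = acc.reverse ++ mtScan ftype gap (f :: m :: rest))
      ∧ (∀ (acc : List (List Int)) (a b d : Int),
        (rest.foldl (mtStep ftype gap) ([a, b, ftype, d] :: acc)).reverse
          = acc.reverse ++
              (let r := mtExt ftype gap b d rest
               [a, r.1, ftype, r.2.1] :: mtScan ftype gap r.2.2)) := by
  intro n
  induction n with
  | zero =>
      intro rest hlen
      have : rest = [] := List.eq_nil_of_length_eq_zero (Nat.le_zero.mp hlen)
      subst this
      constructor
      · intro acc f m; simp [mtScan]
      · intro acc a b d; simp [mtExt, mtScan]
  | succ n ih =>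
      intro rest hlen
      constructor
      · -- L1
        intro acc f m
        match rest with
        | [] => simp [mtScan]
        | l :: rest' =>
            simp only [List.foldl_cons]
            by_cases hc : pvGetI m 3 < gap ∧ pvGetI m 2 = 0 ∧ pvGetI l 2 = ftype ∧ pvGetI f 2 = ftype
            · rw [show mtStep ftype gap (m :: f :: acc) l
                    = [pvGetI f 0, pvGetI l 1, ftype, pvGetI f 3 + pvGetI m 3 + pvGetI l 3] :: acc
                  from by simp [mtStep, hc]]
              have h2 := (ih rest' (by simpa using Nat.le_of_succ_le_succ hlen)).2 acc
                (pvGetI f 0) (pvGetI l 1) (pvGetI f 3 + pvGetI m 3 + pvGetI l 3)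
              rw [h2]
              have hsc : mtScan ftype gap (f :: m :: l :: rest')
                  = (let r := mtExt ftype gap (pvGetI l 1) (pvGetI f 3 + pvGetI m 3 + pvGetI l 3) rest'
                     [pvGetI f 0, r.1, ftype, r.2.1] :: mtScan ftype gap r.2.2) := by
                rw [mtScan]; rw [if_pos ⟨hc.2.2.2, hc.1, hc.2.1, hc.2.2.1⟩]
              rw [hsc]
            · rw [show mtStep ftype gap (m :: f :: acc) l = l :: m :: f :: acc
                  from by simp [mtStep, hc]]
              have h1 := (ih rest' (by simpa using Nat.le_of_succ_le_succ hlen)).1 (f :: acc) m l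
              rw [h1]
              have hsc : mtScan ftype gap (f :: m :: l :: rest')
                  = f :: mtScan ftype gap (m :: l :: rest') := by
                rw [mtScan]; rw [if_neg (by tauto)]
              rw [hsc]; simp
      · -- L2
        intro acc a b d
        match rest with
        | [] => simp [mtExt, mtScan]
        | [x] =>
            have hpush : mtStep ftype gap ([a, b, ftype, d] :: acc) x
                = x :: [a, b, ftype, d] :: acc := by
              match acc with
              | [] => simp [mtStep]
              | e :: acc' =>
                  have : ¬ (pvGetI ([a, b, ftype, d] : List Int) 3 < gap ∧
                      pvGetI ([a, b, ftype, d] : List Int) 2 = 0 ∧ pvGetI x 2 = ftype ∧ pvGetI e 2 = ftype) := by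
                    intro h; exact hf (by simpa [pvGetI] using h.2.1)
                  simp [mtStep, this]
            simp only [List.foldl_cons, List.foldl_nil, hpush]
            simp [mtExt, mtScan]
        | x :: y :: rest'' =>
            have hpush : mtStep ftype gap ([a, b, ftype, d] :: acc) x
                = x :: [a, b, ftype, d] :: acc := by
              match acc with
              | [] => simp [mtStep]
              | e :: acc' =>
                  have : ¬ (pvGetI ([a, b, ftype, d] : List Int) 3 < gap ∧
                      pvGetI ([a, b, ftype, d] : List Int) 2 = 0 ∧ pvGetI x 2 = ftype ∧ pvGetI e 2 = ftype) := by
                    intro h; exact hf (by simpa [pvGetI] using h.2.1)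
                  simp [mtStep, this]
            simp only [List.foldl_cons, hpush]
            have hlen'' : rest''.length ≤ n := by simp at hlen; omega
            by_cases hc : pvGetI x 3 < gap ∧ pvGetI x 2 = 0 ∧ pvGetI y 2 = ftype
            · have hstep : mtStep ftype gap (x :: [a, b, ftype, d] :: acc) y
                  = [a, pvGetI y 1, ftype, d + pvGetI x 3 + pvGetI y 3] :: acc := by
                have hcc : pvGetI x 3 < gap ∧ pvGetI x 2 = 0 ∧ pvGetI y 2 = ftype ∧
                    pvGetI ([a, b, ftype, d] : List Int) 2 = ftype := ⟨hc.1, hc.2.1, hc.2.2, by simp [pvGetI]⟩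
                simp only [mtStep]
                rw [if_pos hcc]
                simp [pvGetI]
              rw [hstep]
              have h2 := (ih rest'' hlen'').2 acc a (pvGetI y 1) (d + pvGetI x 3 + pvGetI y 3)
              rw [h2]
              have hext : mtExt ftype gap b d (x :: y :: rest'')
                  = mtExt ftype gap (pvGetI y 1) (d + pvGetI x 3 + pvGetI y 3) rest'' := by
                rw [mtExt, if_pos hc]
              rw [hext]
            · have hstep : mtStep ftype gap (x :: [a, b, ftype, d] :: acc) y
                  = y :: x :: [a, b, ftype, d] :: acc := by
                have : ¬ (pvGetI x 3 < gap ∧ pvGetI x 2 = 0 ∧ pvGetI y 2 = ftype ∧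
                    pvGetI ([a, b, ftype, d] : List Int) 2 = ftype) := by tauto
                simp [mtStep, this]
              rw [hstep]
              have h1 := (ih rest'' hlen'').1 ([a, b, ftype, d] :: acc) x y
              rw [h1]
              have hext : mtExt ftype gap b d (x :: y :: rest'')
                  = (b, d, x :: y :: rest'') := by rw [mtExt, if_neg hc]
              rw [hext]; simp

-- ===== VERDICT (by name: the statement is the Claim_ definition above) =====
theorem merge_type_spec : Claim_equal_merge_type := by
  intro sections_list ftype gap _ hpre
  unfold Spec_merge_type
  rcases hpre with hshort | ⟨hf, _⟩
  · -- length ≤ 2: A's loop body never runs, B's scan never finds a 3-window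
    match sections_list with
    | [] => rfl
    | [x] => rfl
    | [x, y] => simp [merge_type, merge_type_alt, mtScan]
    | x :: y :: z :: t => simp at hshort
  · match sections_list with
    | [] => rfl
    | [x] => rfl
    | s0 :: s1 :: rest =>
        have h := (mt_main ftype gap hf rest.length rest le_rfl).1 [] s0 s1
        simp only [List.reverse_nil, List.nil_append] at h
        simp [merge_type, merge_type_alt]
        exact h
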